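-- pv_equiv track=rewrite | github.com/BenjaminRains/mdc_analytics | scripts/sql/treatment_journey_ml/update_indexes.py | extract_index_info
-- ===== SOURCE A (Python) =====
-- def extract_index_info(index_sql: str) -> tuple[str, str]:
--     """Extract table name and index name from CREATE INDEX statement"""
--     # Match pattern: CREATE INDEX [IF NOT EXISTS] idx_ml_NAME ON TABLE
--     parts = index_sql.upper().split()
--     try:
--         table_idx = parts.index('ON') + 1
--         table_name = parts[table_idx].strip()
--
--         # Get index name after idx_ml_
--         index_parts = [p for p in parts if p.startswith('IDX_ML_')]
--         if not index_parts:
--             raise ValueError("No idx_ml_ index name found")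
--         index_name = index_parts[0].split('IDX_ML_')[1]
--
--         return table_name, index_name
--     except (IndexError, ValueError) as e:
--         raise ValueError(f"Invalid index SQL format: {e}")
-- ===== SOURCE B (Python) =====
-- def extract_index_info(index_sql: str) -> tuple[str, str]:
--     """Extract table name and index name from CREATE INDEX statement.
--
--     Single pass over the tokens with accumulators (a tiny state machine),
--     instead of separate .index()/indexing/comprehension scans.
--     """
--     table_name = None
--     index_name = None
--     prev_on = False
--     for tok in index_sql.upper().split():
--         if prev_on and table_name is None:
--             table_name = tok
--         prev_on = tok == 'ON'
--         if index_name is None and tok.startswith('IDX_ML_'):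
--             index_name = tok.split('IDX_ML_')[1]
--     if table_name is None or index_name is None:
--         raise ValueError("Invalid index SQL format: missing ON table or idx_ml_ index name")
--     return table_name, index_name
-- ===== Notes on version B (the rewrite author's own statement) =====
-- stated objective: alternative
-- what changed: Replaces the three separate scans of the token list (parts.index('ON'), indexing, and a comprehension filter) by a single pass over the tokens with a prev-was-ON flag and two accumulators.
-- outside the precondition, e.g. on extract_index_info('ON'): A raises ValueError, B raises ValueError; on extract_index_info('IDX_ML_'): A raises ValueError, B raises ValueError
import Mathlib
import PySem

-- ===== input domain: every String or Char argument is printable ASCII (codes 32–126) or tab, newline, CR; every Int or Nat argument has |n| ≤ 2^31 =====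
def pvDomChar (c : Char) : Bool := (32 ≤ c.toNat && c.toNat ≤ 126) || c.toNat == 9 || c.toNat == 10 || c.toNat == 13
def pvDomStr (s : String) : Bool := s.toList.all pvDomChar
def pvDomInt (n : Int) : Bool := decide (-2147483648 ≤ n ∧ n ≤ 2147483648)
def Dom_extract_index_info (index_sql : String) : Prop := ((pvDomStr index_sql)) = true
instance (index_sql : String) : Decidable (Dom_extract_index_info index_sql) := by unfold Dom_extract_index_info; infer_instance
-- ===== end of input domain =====

-- B replaces A's three separate scans of the token list by one pass with accumulators; return values only (neither mutates).

-- ===== PORT A =====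
def extract_index_info (index_sql : String) : String × String :=
  let parts := PySem.Str.split₀ (PySem.Str.upper index_sql)
  match PySem.List.index? parts "ON" with
  | none => ("", "")                     -- parts.index('ON') raises ValueError (outside Pre_)
  | some i =>
    match PySem.List.pyGet? parts ((i : Int) + 1) with
    | none => ("", "")                   -- parts[table_idx] raises IndexError (outside Pre_)
    | some t =>
      let table_name := PySem.Str.strip t
      let index_parts := parts.filter (fun p => PySem.Str.startswith p "IDX_ML_")
      match index_parts with
      | [] => ("", "")                   -- explicit raise ValueError (outside Pre_)
      | p :: _ =>
        match (PySem.Str.split? p "IDX_ML_").bind (fun l => PySem.List.pyGet? l 1) with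
        | none => ("", "")               -- unreachable: p startswith IDX_ML_ gives ≥ 2 pieces
        | some index_name => (table_name, index_name)

-- ===== PORT B =====
def pvAltStep (st : Option String × Option String × Bool) (tok : String) : Option String × Option String × Bool :=
  let table := if st.2.2 && st.1.isNone then some tok else st.1
  let idx := if st.2.1.isNone && PySem.Str.startswith tok "IDX_ML_"
             then (PySem.Str.split? tok "IDX_ML_").bind (fun l => PySem.List.pyGet? l 1)
             else st.2.1
  (table, idx, tok == "ON")

def extract_index_info_alt (index_sql : String) : String × String :=
  let st := (PySem.Str.split₀ (PySem.Str.upper index_sql)).foldl pvAltStep (none, none, false)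
  match st.1, st.2.1 with
  | some t, some i => (t, i)
  | _, _ => ("", "")                     -- raise ValueError (outside Pre_)

-- ===== PRECONDITION & SPEC =====
-- Pre_ excludes exactly the inputs on which Python A raises ValueError: no 'ON' token followed
-- by a further token, or no token starting with 'IDX_ML_' (B raises there as well).
def Pre_extract_index_info (index_sql : String) : Prop :=
  let parts := PySem.Str.split₀ (PySem.Str.upper index_sql)
  "ON" ∈ parts.dropLast ∧ parts.any (fun p => PySem.Str.startswith p "IDX_ML_") = true
instance (index_sql : String) : Decidable (Pre_extract_index_info index_sql) := by unfold Pre_extract_index_info; infer_instance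

def pvWitness_extract_index_info : String := "CREATE INDEX idx_ml_foo ON t1 (c)"

def Spec_extract_index_info (index_sql : String) (out : String × String) : Prop := out = extract_index_info_alt index_sql
instance (index_sql : String) (out : String × String) : Decidable (Spec_extract_index_info index_sql out) := by unfold Spec_extract_index_info; infer_instance

-- ===== CLAIM (what is proved, stated in full; the proofs are below) =====
def Claim_equal_extract_index_info : Prop := ∀ (index_sql : String), Dom_extract_index_info index_sql → Pre_extract_index_info index_sql → Spec_extract_index_info index_sql (extract_index_info index_sql)

-- ===== LEMMAS AND PROOFS =====

-- final states of B's three accumulators, written as stand-alone recursions (proof helpers)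
def pvTab : List String → Option String → Bool → Option String
  | [], t, _ => t
  | tok :: r, t, p => pvTab r (if p && t.isNone then some tok else t) (tok == "ON")

def pvMk (tok : String) : Option String :=
  (PySem.Str.split? tok "IDX_ML_").bind (fun l => PySem.List.pyGet? l 1)

def pvIdx : List String → Option String → Option String
  | [], i => i
  | tok :: r, i => pvIdx r (if i.isNone && PySem.Str.startswith tok "IDX_ML_" then pvMk tok else i)

def pvLast : List String → Bool → Bool
  | [], p => p
  | tok :: r, _ => pvLast r (tok == "ON")

theorem pvFoldl_eq (parts : List String) :
    ∀ st : Option String × Option String × Bool,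
      parts.foldl pvAltStep st = (pvTab parts st.1 st.2.2, pvIdx parts st.2.1, pvLast parts st.2.2) := by
  induction parts with
  | nil => intro st; rfl
  | cons tok r ih =>
    intro st
    simp only [List.foldl_cons, ih, pvAltStep, pvTab, pvIdx, pvLast, pvMk]

theorem pvTab_some (parts : List String) (v : String) (p : Bool) :
    pvTab parts (some v) p = some v := by
  induction parts generalizing p with
  | nil => rfl
  | cons tok r ih => simp [pvTab, ih]

theorem pvTab_true (parts : List String) :
    pvTab parts none true = parts.head? := by
  cases parts with
  | nil => rfl
  | cons tok r => simp [pvTab, pvTab_some]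

theorem pvTab_spec (parts : List String) :
    pvTab parts none false =
      (PySem.List.index? parts "ON").bind (fun i => PySem.List.pyGet? parts ((i : Int) + 1)) := by
  induction parts with
  | nil => rfl
  | cons tok r ih =>
    by_cases h : tok = "ON"
    · subst h
      rw [PySem.List.index?_cons_self, Option.bind_some]
      have hstep : pvTab ("ON" :: r) none false = pvTab r none true := by simp [pvTab]
      rw [hstep, pvTab_true, show ((0:ℕ):Int) + 1 = ((0:ℕ):Int) + 1 from rfl,
        PySem.List.pyGet?_cons_succ "ON" r 0]
      simp [PySem.List.pyGet?_zero, List.head?_eq_getElem?]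
    · rw [PySem.List.index?_cons_of_ne r h]
      have hb : (tok == "ON") = false := by simp [h]
      have hstep : pvTab (tok :: r) none false = pvTab r none false := by simp [pvTab, hb]
      rw [hstep, ih]
      cases hidx : PySem.List.index? r "ON" with
      | none => rfl
      | some i =>
        simp only [Option.map_some, Option.bind_some]
        rw [show ((i + 1 : ℕ) : Int) + 1 = (↑(i + 1 : ℕ) : Int) + 1 from rfl,
          PySem.List.pyGet?_cons_succ tok r (i + 1)]
        congr 1
theorem pvGoLen (sep : List Char) (fuel : Nat) :
    ∀ (l cur : List Char) (acc : List (List Char)),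
      acc.length + 1 ≤ (PySem.Chars.splitOn.go sep fuel l cur acc).length := by
  induction fuel with
  | zero => intro l cur acc; simp [PySem.Chars.splitOn.go]
  | succ fuel ih =>
    intro l cur acc
    cases l with
    | nil => simp [PySem.Chars.splitOn.go]
    | cons c rest =>
      rw [PySem.Chars.splitOn.go]
      by_cases h : sep.isPrefixOf (c :: rest) = true
      · rw [if_pos h]
        have := ih (List.drop sep.length (c :: rest)) [] (cur.reverse :: acc)
        simpa using Nat.le_trans (by simp) this
      · rw [if_neg h]
        exact ih rest (c :: cur) acc

theorem pvMk_isSome (tok : String) (h : PySem.Str.startswith tok "IDX_ML_" = true) :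
    (pvMk tok).isSome = true := by
  unfold pvMk
  have hpre : ("IDX_ML_" : String).toList.isPrefixOf tok.toList = true := by
    simpa [PySem.Str.startswith, PySem.Chars.startswith] using h
  have hlen : 2 ≤ (PySem.Chars.splitOn tok.toList ("IDX_ML_" : String).toList).length := by
    unfold PySem.Chars.splitOn
    cases htl : tok.toList with
    | nil => rw [htl] at hpre; simp at hpre
    | cons c rest =>
      rw [htl] at hpre
      rw [PySem.Chars.splitOn.go, if_pos hpre]
      have := pvGoLen ("IDX_ML_" : String).toList (c :: rest).length
        (List.drop ("IDX_ML_" : String).toList.length (c :: rest)) [] [List.reverse []]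
      simpa using this
  rw [show (1:Int) = ((1:ℕ):Int) from rfl]
  simp only [PySem.Str.split?, PySem.Chars.split?, PySem.List.pyGet?_natCast]
  rw [if_neg (by simp)]
  simp only [Option.map_some, Option.bind_some]
  have h1 : 1 < (List.map String.ofList (PySem.Chars.splitOn tok.toList ("IDX_ML_":String).toList)).length := by
    simpa using hlen
  simp
  rw [show ['I','D','X','_','M','L','_'] = ("IDX_ML_" : String).toList from rfl]
  omega

theorem pvIdx_some (parts : List String) (v : String) : pvIdx parts (some v) = some v := by
  induction parts with
  | nil => rfl
  | cons tok r ih => simpa [pvIdx] using ih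

theorem pvIdx_spec (parts : List String) :
    pvIdx parts none =
      match parts.filter (fun p => PySem.Str.startswith p "IDX_ML_") with
      | [] => none
      | p :: _ => pvMk p := by
  induction parts with
  | nil => rfl
  | cons tok r ih =>
    cases h : PySem.Str.startswith tok "IDX_ML_" with
    | true =>
      have hstep : pvIdx (tok :: r) none = pvIdx r (pvMk tok) := by
        simp only [pvIdx, Option.isNone_none, Bool.true_and, h, if_true]
      rw [hstep, List.filter_cons, if_pos h]
      cases hmk : pvMk tok with
      | none => exact absurd (pvMk_isSome tok h) (by simp [hmk])
      | some v =>
        show pvIdx r (some v) = pvMk tok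
        rw [pvIdx_some]
        exact hmk.symm
    | false =>
      have hstep : pvIdx (tok :: r) none = pvIdx r none := by
        simp only [pvIdx, Option.isNone_none, Bool.true_and, h, Bool.false_eq_true, if_false]
      rw [hstep, List.filter_cons, if_neg (by rw [h]; exact Bool.false_ne_true)]
      exact ih

theorem pvSplit₀NoSpace (s : List Char) :
    ∀ cur acc,
      (∀ c ∈ cur, PySem.Chars.isspace c = false) →
      (∀ t ∈ acc, ∀ c ∈ t, PySem.Chars.isspace c = false) →
      ∀ t ∈ PySem.Chars.split₀.go s cur acc, ∀ c ∈ t, PySem.Chars.isspace c = false := by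
  induction s with
  | nil =>
    intro cur acc hcur hacc t ht
    rw [PySem.Chars.split₀.go] at ht
    by_cases he : cur.isEmpty = true
    · rw [if_pos he] at ht; simp at ht
      exact hacc t ht
    · rw [if_neg he] at ht; simp at ht
      rcases ht with h1 | h2
      · exact hacc t h1
      · subst h2; intro c hc; exact hcur c (by simpa using hc)
  | cons c rest ih =>
    intro cur acc hcur hacc t ht
    rw [PySem.Chars.split₀.go] at ht
    by_cases hsp : PySem.Chars.isspace c = true
    · rw [if_pos hsp] at ht
      by_cases he : cur.isEmpty = true
      · rw [if_pos he] at ht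
        exact ih [] acc (by simp) hacc t ht
      · rw [if_neg he] at ht
        refine ih [] (cur.reverse :: acc) (by simp) ?_ t ht
        intro u hu
        rcases List.mem_cons.mp hu with h1 | h2
        · subst h1; intro d hd; exact hcur d (by simpa using hd)
        · exact hacc u h2
    · rw [if_neg hsp] at ht
      refine ih (c :: cur) acc ?_ hacc t ht
      intro d hd
      rcases List.mem_cons.mp hd with h1 | h2
      · subst h1; simpa using hsp
      · exact hcur d h2

theorem pvStrip_id (t : String)
    (h : ∀ c ∈ t.toList, PySem.Chars.isspace c = false) :
    PySem.Str.strip t = t := by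
  have hl : PySem.Chars.lstrip t.toList = t.toList := by
    unfold PySem.Chars.lstrip
    apply List.dropWhile_eq_self_iff.mpr
    intro hl0
    rw [h _ (t.toList.getElem_mem hl0)]
    exact Bool.false_ne_true
  have hr : PySem.Chars.rstrip t.toList = t.toList := by
    unfold PySem.Chars.rstrip
    rw [List.dropWhile_eq_self_iff.mpr, List.reverse_reverse]
    intro hl0
    rw [h _ (by simpa using List.mem_reverse.mp (t.toList.reverse.getElem_mem hl0))]
    exact Bool.false_ne_true
  unfold PySem.Str.strip PySem.Chars.strip
  rw [hl, hr, String.ofList_toList]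

theorem pvStrip_of_mem_split₀ (s : String) (t : String)
    (ht : t ∈ PySem.Str.split₀ s) : PySem.Str.strip t = t := by
  unfold PySem.Str.split₀ at ht
  simp only [List.mem_map] at ht
  obtain ⟨l, hl, rfl⟩ := ht
  apply pvStrip_id
  intro c hc
  have hns := pvSplit₀NoSpace s.toList [] [] (by simp) (by simp) l
    (by simpa [PySem.Chars.split₀] using hl)
  exact hns c (by simpa using hc)

-- ===== VERDICT (by name: the statement is the Claim_ definition above) =====
theorem extract_index_info_spec : Claim_equal_extract_index_info := by
  intro index_sql _ _
  unfold Spec_extract_index_info extract_index_info extract_index_info_alt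
  rw [pvFoldl_eq]
  simp only [pvTab_spec, pvIdx_spec]
  cases hidx : PySem.List.index? (PySem.Str.split₀ (PySem.Str.upper index_sql)) "ON" with
  | none => rfl
  | some i =>
    simp only [Option.bind_some]
    cases hget : PySem.List.pyGet? (PySem.Str.split₀ (PySem.Str.upper index_sql)) ((i : Int) + 1) with
    | none => rfl
    | some t =>
      cases hf : (PySem.Str.split₀ (PySem.Str.upper index_sql)).filter
          (fun p => PySem.Str.startswith p "IDX_ML_") with
      | nil => rfl
      | cons p r =>
        cases hmk : pvMk p with
        | none =>
          have hp : PySem.Str.startswith p "IDX_ML_" = true :=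
            (List.of_mem_filter (a := p) (by rw [hf]; exact List.mem_cons_self))
          exact absurd (pvMk_isSome p hp) (by simp [hmk])
        | some v =>
          have hmk2 : ((PySem.Str.split? p "IDX_ML_").bind (fun l => PySem.List.pyGet? l 1)) = some v := hmk
          have hts : PySem.Str.strip t = t :=
            pvStrip_of_mem_split₀ _ _
              (PySem.List.mem_of_pyGet?_eq_some _ hget)
          simp only [hmk2, hmk, hts]
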